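-- pv_equiv track=rewrite | github.com/takezxo1/spotify-telegram-bot | youtube_handler.py | get_available_qualities
-- ===== SOURCE A (Python) =====
-- def get_available_qualities(formats):
--     """Extract available video qualities from formats."""
--     qualities = set()
--
--     for fmt in formats:
--         height = fmt.get('height')
--         if height:
--             if height <= 144:
--                 qualities.add('144p')
--             elif height <= 240:
--                 qualities.add('240p')
--             elif height <= 360:
--                 qualities.add('360p')
--             elif height <= 480:
--                 qualities.add('480p')
--             elif height <= 720:
--                 qualities.add('720p')
--             elif height <= 1080:
--                 qualities.add('1080p')
--
--     # Sort qualities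
--     quality_order = ['144p', '240p', '360p', '480p', '720p', '1080p']
--     available = [q for q in quality_order if q in qualities]
--
--     if available:
--         available.append('best')
--
--     return available
-- ===== SOURCE B (Python) =====
-- def _bucket(height):
--     """Index of the first threshold >= height (hand-written bisect_left)."""
--     thresholds = [144, 240, 360, 480, 720, 1080]
--     lo, hi = 0, len(thresholds)
--     while lo < hi:
--         mid = (lo + hi) // 2
--         if thresholds[mid] < height:
--             lo = mid + 1
--         else:
--             hi = mid
--     return lo
--
-- def get_available_qualities(formats):
--     """Extract available video qualities from formats."""
--     labels = ['144p', '240p', '360p', '480p', '720p', '1080p']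
--     found = set()
--     for fmt in formats:
--         height = fmt.get('height')
--         if height:
--             i = _bucket(height)
--             if i < len(labels):
--                 found.add(labels[i])
--     available = [q for q in labels if q in found]
--     if available:
--         available.append('best')
--     return available
-- ===== Notes on version B (the rewrite author's own statement) =====
-- stated objective: idiomatic
-- what changed: Replaced the six-branch if-elif threshold cascade by a threshold/label table with a hand-written bisect_left binary search that picks the bucket index.
import Mathlib
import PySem

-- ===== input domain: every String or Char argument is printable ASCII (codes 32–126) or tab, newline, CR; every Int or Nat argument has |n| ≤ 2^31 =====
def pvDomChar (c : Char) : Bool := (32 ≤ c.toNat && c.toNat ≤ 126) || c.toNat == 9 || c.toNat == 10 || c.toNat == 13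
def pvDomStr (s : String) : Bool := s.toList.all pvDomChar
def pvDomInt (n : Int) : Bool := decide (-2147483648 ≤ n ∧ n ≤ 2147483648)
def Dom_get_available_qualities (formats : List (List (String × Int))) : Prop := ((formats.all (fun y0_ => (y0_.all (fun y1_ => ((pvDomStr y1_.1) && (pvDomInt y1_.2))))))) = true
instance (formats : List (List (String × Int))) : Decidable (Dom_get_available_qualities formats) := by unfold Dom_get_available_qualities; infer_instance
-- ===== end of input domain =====

-- B replaces A's if-elif threshold cascade by a hand-written binary search over a
-- threshold table (idiomatic bisect_left); return value is provably identical.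

-- ===== PORT A =====
def get_available_qualities (formats : List (List (String × Int))) : List String :=
  let qualities : PySem.Set String :=
    formats.foldl (fun (qs : PySem.Set String) (fmt : List (String × Int)) =>
      match (PySem.Dict.mk fmt).get? "height" with
      | none => qs
      | some height =>
        if height ≠ 0 then
          if height ≤ 144 then PySem.Set.add qs "144p"
          else if height ≤ 240 then PySem.Set.add qs "240p"
          else if height ≤ 360 then PySem.Set.add qs "360p"
          else if height ≤ 480 then PySem.Set.add qs "480p"
          else if height ≤ 720 then PySem.Set.add qs "720p"
          else if height ≤ 1080 then PySem.Set.add qs "1080p"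
          else qs
        else qs) PySem.Set.empty
  let quality_order : List String := ["144p", "240p", "360p", "480p", "720p", "1080p"]
  let available := quality_order.filter (fun q => decide (q ∈ qualities))
  if available ≠ [] then available ++ ["best"] else available

-- ===== PORT B =====
-- hand-written bisect_left loop of Source B's _bucket (while lo < hi)
def pvBucketLoop (thresholds : List Int) (height : Int) (lo hi : Nat) : Nat :=
  if h : lo < hi then
    let mid := (lo + hi) / 2
    if thresholds.getD mid 0 < height then pvBucketLoop thresholds height (mid + 1) hi
    else pvBucketLoop thresholds height lo mid
  else lo
termination_by hi - lo
decreasing_by all_goals omega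

def pvBucket (height : Int) : Nat :=
  let thresholds : List Int := [144, 240, 360, 480, 720, 1080]
  pvBucketLoop thresholds height 0 thresholds.length

def get_available_qualities_alt (formats : List (List (String × Int))) : List String :=
  let labels : List String := ["144p", "240p", "360p", "480p", "720p", "1080p"]
  let found : PySem.Set String :=
    formats.foldl (fun (fs : PySem.Set String) (fmt : List (String × Int)) =>
      match (PySem.Dict.mk fmt).get? "height" with
      | none => fs
      | some height =>
        if height ≠ 0 then
          let i := pvBucket height
          if i < labels.length then PySem.Set.add fs (labels.getD i "") else fs
        else fs) PySem.Set.empty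
  let available := labels.filter (fun q => decide (q ∈ found))
  if available ≠ [] then available ++ ["best"] else available

-- ===== PRECONDITION & SPEC =====
def Spec_get_available_qualities (formats : List (List (String × Int))) (out : List String) : Prop := out = get_available_qualities_alt formats
instance (formats : List (List (String × Int))) (out : List String) : Decidable (Spec_get_available_qualities formats out) := by unfold Spec_get_available_qualities; infer_instance

-- ===== CLAIM (what is proved, stated in full; the proofs are below) =====
def Claim_equal_get_available_qualities : Prop := ∀ (formats : List (List (String × Int))), Dom_get_available_qualities formats → Spec_get_available_qualities formats (get_available_qualities formats)

-- ===== LEMMAS AND PROOFS =====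

-- the binary search lands in the same bucket as A's comparison chain
theorem pvBucket_eq (h : Int) : pvBucket h =
    if h ≤ 144 then 0 else if h ≤ 240 then 1 else if h ≤ 360 then 2
    else if h ≤ 480 then 3 else if h ≤ 720 then 4 else if h ≤ 1080 then 5 else 6 := by
  unfold pvBucket
  rw [pvBucketLoop.eq_def]; norm_num
  split_ifs <;>
    (try (rw [pvBucketLoop.eq_def]; norm_num)) <;>
    (try split_ifs) <;>
    (try (rw [pvBucketLoop.eq_def]; norm_num)) <;>
    (try split_ifs) <;>
    (try (rw [pvBucketLoop.eq_def]; norm_num)) <;>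
    omega

-- the per-format step functions of the two folds agree
theorem pv_step_eq :
    (fun (qs : PySem.Set String) (fmt : List (String × Int)) =>
      match (PySem.Dict.mk fmt).get? "height" with
      | none => qs
      | some height =>
        if height ≠ 0 then
          if height ≤ 144 then PySem.Set.add qs "144p"
          else if height ≤ 240 then PySem.Set.add qs "240p"
          else if height ≤ 360 then PySem.Set.add qs "360p"
          else if height ≤ 480 then PySem.Set.add qs "480p"
          else if height ≤ 720 then PySem.Set.add qs "720p"
          else if height ≤ 1080 then PySem.Set.add qs "1080p"
          else qs
        else qs)
    =
    (fun (fs : PySem.Set String) (fmt : List (String × Int)) =>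
      match (PySem.Dict.mk fmt).get? "height" with
      | none => fs
      | some height =>
        if height ≠ 0 then
          let i := pvBucket height
          if i < (["144p", "240p", "360p", "480p", "720p", "1080p"] : List String).length
          then PySem.Set.add fs ((["144p", "240p", "360p", "480p", "720p", "1080p"] : List String).getD i "") else fs
        else fs) := by
  funext qs fmt
  cases (PySem.Dict.mk fmt).get? "height" with
  | none => rfl
  | some height =>
    simp only [pvBucket_eq height, List.length_cons, List.length_nil]
    split_ifs <;> first | rfl | omega

-- ===== VERDICT (by name: the statement is the Claim_ definition above) =====
theorem get_available_qualities_spec : Claim_equal_get_available_qualities := by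
  intro formats _
  show _ = _
  unfold get_available_qualities get_available_qualities_alt
  rw [pv_step_eq]
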